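-- pv_equiv track=rewrite | github.com/LonelyWise/VivaLNKTool | Vivalnk/network/Get_vCloudData.py | cut_time
-- ===== SOURCE A (Python) =====
-- def cut_time(start,end):
--     time_slice = []
--     it = start
--     while it < end:
--         new_end = it + 60*1000 - 1
--         if end <= new_end:
--             time_slice.append((it, end))
--             break
--         else:
--             time_slice.append((it, new_end))
--             it = new_end + 1
--     return time_slice
-- ===== SOURCE B (Python) =====
-- def cut_time(start, end):
--     # Divide-and-conquer: split the range at a minute-aligned midpoint and recurse;
--     # base case emits a single slice.
--     if end <= start:
--         return []
--     if end - start <= 60000: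
--         return [(start, min(start + 59999, end))]
--     n = -((start - end) // 60000)          # ceil((end-start)/60000) = number of slices
--     mid = start + (n // 2) * 60000         # minute-aligned split point, strictly inside
--     return cut_time(start, mid) + cut_time(mid, end)
-- ===== Notes on version B (the rewrite author's own statement) =====
-- stated objective: alternative
-- what changed: Replaces A's sequential carry-variable while loop with a divide-and-conquer recursion that splits the range at a minute-aligned midpoint and concatenates the two halves, with a single-slice base case.
import Mathlib
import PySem

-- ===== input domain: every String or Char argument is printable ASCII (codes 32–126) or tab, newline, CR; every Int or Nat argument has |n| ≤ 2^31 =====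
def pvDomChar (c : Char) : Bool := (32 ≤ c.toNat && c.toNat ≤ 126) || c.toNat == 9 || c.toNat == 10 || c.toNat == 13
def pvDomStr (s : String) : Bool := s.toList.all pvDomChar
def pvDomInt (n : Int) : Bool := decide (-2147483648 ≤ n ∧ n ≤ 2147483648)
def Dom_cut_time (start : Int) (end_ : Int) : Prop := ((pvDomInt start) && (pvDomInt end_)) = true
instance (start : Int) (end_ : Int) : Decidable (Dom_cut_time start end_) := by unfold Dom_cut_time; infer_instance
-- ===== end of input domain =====

-- B replaces A's sequential carry-variable while loop with a divide-and-conquer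
-- recursion splitting at a minute-aligned midpoint (objective: alternative).

-- ===== PORT A =====
-- A's while loop, state `it`; entries emitted by cons in loop order
def cut_time_go (it : Int) (end_ : Int) : List (Int × Int) :=
  if _h : it < end_ then
    let new_end := it + 60 * 1000 - 1
    if end_ ≤ new_end then [(it, end_)]
    else (it, new_end) :: cut_time_go (new_end + 1) end_
  else []
termination_by (end_ - it).toNat
decreasing_by omega

def cut_time (start : Int) (end_ : Int) : List (Int × Int) :=
  cut_time_go start end_

-- ===== PORT B =====
-- midpoint bounds used by B's termination proof
lemma cut_time_mid_bounds (start end_ : Int) (h1 : ¬ end_ ≤ start) (h2 : ¬ end_ - start ≤ 60000) :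
    start < start + (PySem.Int.floordiv (-(PySem.Int.floordiv (start - end_) 60000)) 2) * 60000 ∧
    start + (PySem.Int.floordiv (-(PySem.Int.floordiv (start - end_) 60000)) 2) * 60000 < end_ := by
  rw [PySem.Int.floordiv_eq_ediv_of_pos (by omega : (0:Int) < 60000),
      PySem.Int.floordiv_eq_ediv_of_pos (by omega : (0:Int) < 2)]
  have hq := Int.ediv_add_emod (start - end_) 60000
  have hr1 : 0 ≤ (start - end_) % 60000 := Int.emod_nonneg _ (by omega)
  have hr2 : (start - end_) % 60000 < 60000 := Int.emod_lt_of_pos _ (by omega)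
  set q := (start - end_) / 60000 with hqdef
  have hh := Int.ediv_add_emod (-q) 2
  have hs1 : 0 ≤ (-q) % 2 := Int.emod_nonneg _ (by omega)
  have hs2 : (-q) % 2 < 2 := Int.emod_lt_of_pos _ (by omega)
  set h := (-q) / 2 with hhdef
  constructor <;> nlinarith [hq, hh]

def cut_time_alt (start : Int) (end_ : Int) : List (Int × Int) :=
  if h1 : end_ ≤ start then []
  else if h2 : end_ - start ≤ 60000 then [(start, min (start + 59999) end_)]
  else
    let n := -(PySem.Int.floordiv (start - end_) 60000)
    let mid := start + (PySem.Int.floordiv n 2) * 60000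
    cut_time_alt start mid ++ cut_time_alt mid end_
termination_by (end_ - start).toNat
decreasing_by
  · have := cut_time_mid_bounds start end_ h1 h2; omega
  · have := cut_time_mid_bounds start end_ h1 h2; omega

-- ===== PRECONDITION & SPEC =====
def Spec_cut_time (start : Int) (end_ : Int) (out : List (Int × Int)) : Prop := out = cut_time_alt start end_
instance (start : Int) (end_ : Int) (out : List (Int × Int)) : Decidable (Spec_cut_time start end_ out) := by unfold Spec_cut_time; infer_instance

-- ===== CLAIM (what is proved, stated in full; the proofs are below) =====
def Claim_equal_cut_time : Prop := ∀ (start : Int) (end_ : Int), Dom_cut_time start end_ → Spec_cut_time start end_ (cut_time start end_)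

-- ===== LEMMAS AND PROOFS =====

-- A's loop splits at any minute-aligned point strictly inside the range
lemma cut_time_go_split (k : Nat) : ∀ (start mid end_ : Int),
    mid - start = 60000 * ((k : Int) + 1) → mid < end_ →
    cut_time_go start end_ = cut_time_go start mid ++ cut_time_go mid end_ := by
  induction k with
  | zero =>
    intro start mid end_ hm hlt
    rw [cut_time_go, cut_time_go]
    rw [dif_pos (by omega : start < end_), dif_pos (by omega : start < mid)]
    simp only
    rw [if_neg (by omega : ¬ end_ ≤ start + 60 * 1000 - 1),
        if_neg (by omega : ¬ mid ≤ start + 60 * 1000 - 1)]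
    have hm' : start + 60 * 1000 - 1 + 1 = mid := by omega
    rw [hm']
    have hnil : cut_time_go mid mid = [] := by
      rw [cut_time_go]; exact dif_neg (by omega)
    rw [hnil]
    simp
  | succ k ih =>
    intro start mid end_ hm hlt
    rw [cut_time_go, cut_time_go]
    rw [dif_pos (by omega : start < end_), dif_pos (by omega : start < mid)]
    simp only
    rw [if_neg (by omega : ¬ end_ ≤ start + 60 * 1000 - 1),
        if_neg (by omega : ¬ mid ≤ start + 60 * 1000 - 1)]
    rw [List.cons_append]
    congr 1
    exact ih (start + 60 * 1000 - 1 + 1) mid end_ (by push_cast at hm ⊢; omega) hlt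

-- single-slice base case of A's loop
lemma cut_time_go_base (start end_ : Int) (h1 : start < end_) (h2 : end_ - start ≤ 60000) :
    cut_time_go start end_ = [(start, min (start + 59999) end_)] := by
  rw [cut_time_go, dif_pos h1]
  simp only
  by_cases h : end_ ≤ start + 60 * 1000 - 1
  · rw [if_pos h]
    have : min (start + 59999) end_ = end_ := by omega
    rw [this]
  · rw [if_neg h, cut_time_go, dif_neg (by omega : ¬ start + 60 * 1000 - 1 + 1 < end_)]
    have : min (start + 59999) end_ = start + 60 * 1000 - 1 := by omega
    rw [this]

lemma alt_eq_go (N : Nat) : ∀ (start end_ : Int), (end_ - start).toNat ≤ N →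
    cut_time_alt start end_ = cut_time_go start end_ := by
  induction N with
  | zero =>
    intro start end_ hN
    rw [cut_time_alt, cut_time_go]
    rw [dif_pos (by omega : end_ ≤ start), dif_neg (by omega : ¬ start < end_)]
  | succ N ih =>
    intro start end_ hN
    rw [cut_time_alt]
    by_cases h1 : end_ ≤ start
    · rw [dif_pos h1, cut_time_go, dif_neg (by omega : ¬ start < end_)]
    · rw [dif_neg h1]
      by_cases h2 : end_ - start ≤ 60000
      · rw [dif_pos h2, cut_time_go_base start end_ (by omega) h2]
      · rw [dif_neg h2]
        simp only
        obtain ⟨hlo, hhi⟩ := cut_time_mid_bounds start end_ h1 h2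
        set mid := start + PySem.Int.floordiv (-(PySem.Int.floordiv (start - end_) 60000)) 2 * 60000 with hmid
        have hmul : ∃ k : Nat, mid - start = 60000 * ((k : Int) + 1) := by
          refine ⟨(PySem.Int.floordiv (-(PySem.Int.floordiv (start - end_) 60000)) 2 - 1).toNat, ?_⟩
          have : (0:Int) < PySem.Int.floordiv (-(PySem.Int.floordiv (start - end_) 60000)) 2 := by
            by_contra hc; push_neg at hc
            have : mid - start ≤ 0 := by
              rw [hmid]; ring_nf; nlinarith
            omega
          rw [hmid]; push_cast; ring_nf; omega
        obtain ⟨k, hk⟩ := hmul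
        rw [ih start mid (by omega), ih mid end_ (by omega)]
        exact (cut_time_go_split k start mid end_ hk hhi).symm

-- ===== VERDICT (by name: the statement is the Claim_ definition above) =====
theorem cut_time_spec : Claim_equal_cut_time := by
  intro start end_ _
  unfold Spec_cut_time cut_time
  exact (alt_eq_go (end_ - start).toNat start end_ le_rfl).symm
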